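-- pv_equiv track=rewrite | github.com/tianjiazhi/AutoWriteCase | utils/process_data.py | convert_json_path_expr
-- ===== SOURCE A (Python) =====
-- def convert_json_path_expr(json_path_expr:str)->str:
--     split_list = json_path_expr.split('[')
--     length = len(split_list) - 1
--     lists = []
--
--     for index, value in enumerate(split_list):
--         if index != 0:
--             value = '[' + value
--         if not value.endswith('.') and index != length:
--             value = value + '.'
--         lists.append(value)
--     list_convert_str = "".join(lists)
--     return list_convert_str
-- ===== SOURCE B (Python) =====
-- import re
--
-- def convert_json_path_expr(json_path_expr: str) -> str:
--     # Insert a '.' before every '[' that is not already preceded by '.'.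
--     return re.sub(r'(?<!\.)\[', '.[', json_path_expr)
-- ===== Notes on version B (the rewrite author's own statement) =====
-- stated objective: idiomatic
-- what changed: Replaced the split-on-'['/enumerate/conditional-append/join pipeline with a single declarative regex substitution that inserts '.' before every '[' not already preceded by '.'.
import Mathlib
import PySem

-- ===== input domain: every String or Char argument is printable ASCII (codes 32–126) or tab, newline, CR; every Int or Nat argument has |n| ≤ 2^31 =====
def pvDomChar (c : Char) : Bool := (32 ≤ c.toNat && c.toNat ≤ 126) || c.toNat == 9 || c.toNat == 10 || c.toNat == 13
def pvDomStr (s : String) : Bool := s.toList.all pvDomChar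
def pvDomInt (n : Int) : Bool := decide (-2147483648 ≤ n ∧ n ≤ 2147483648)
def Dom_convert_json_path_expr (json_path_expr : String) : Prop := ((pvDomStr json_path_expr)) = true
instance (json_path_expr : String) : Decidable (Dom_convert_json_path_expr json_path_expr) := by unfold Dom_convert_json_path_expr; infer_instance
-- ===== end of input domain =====

-- B replaces A's split-on-'['/enumerate/conditional-append/join pipeline with one regex-style
-- left-to-right pass inserting '.' before every '[' not already preceded by '.' (more idiomatic).


-- ===== PORT A =====
-- literal transliteration of A's split/enumerate/append/join pipeline, on the char-list side
def pvAChars (cs : List Char) : List Char :=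
  let split_list := PySem.Chars.splitOn cs ['[']
  let length : Int := (split_list.length : Int) - 1
  let lists : List (List Char) := (PySem.List.enumerate split_list).foldl (fun acc iv =>
    let value := if iv.1 ≠ 0 then '[' :: iv.2 else iv.2
    let value := if ¬ PySem.Chars.endswith value ['.'] = true ∧ iv.1 ≠ length
                 then value ++ ['.'] else value
    acc ++ [value]) []
  PySem.Chars.join [] lists

def convert_json_path_expr (json_path_expr : String) : String :=
  String.ofList (pvAChars json_path_expr.toList)

-- ===== PORT B =====
-- exact hand port of re.sub(r'(?<!\.)\[', '.[', s): a single left-to-right scan over the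
-- original characters; the lookbehind inspects the previous ORIGINAL character (none at start).
def pvBScan (prev : Option Char) : List Char → List Char
  | [] => []
  | c :: rest =>
      (if c = '[' ∧ prev ≠ some '.' then ['.', c] else [c]) ++ pvBScan (some c) rest

def convert_json_path_expr_alt (json_path_expr : String) : String :=
  String.ofList (pvBScan none json_path_expr.toList)

-- ===== PRECONDITION & SPEC =====
def Spec_convert_json_path_expr (json_path_expr : String) (out : String) : Prop := out = convert_json_path_expr_alt json_path_expr
instance (json_path_expr : String) (out : String) : Decidable (Spec_convert_json_path_expr json_path_expr out) := by unfold Spec_convert_json_path_expr; infer_instance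

-- ===== CLAIM (what is proved, stated in full; the proofs are below) =====
def Claim_equal_convert_json_path_expr : Prop := ∀ (json_path_expr : String), Dom_convert_json_path_expr json_path_expr → Spec_convert_json_path_expr json_path_expr (convert_json_path_expr json_path_expr)

-- ===== LEMMAS AND PROOFS =====

-- simple structural model of cs.split('[')
def pvSplit (pre : List Char) : List Char → List (List Char)
  | [] => [pre]
  | c :: rest => if c = '[' then pre :: pvSplit [] rest else pvSplit (pre ++ [c]) rest

theorem pvSplit_ne_nil (pre : List Char) (cs : List Char) : pvSplit pre cs ≠ [] := by
  induction cs generalizing pre with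
  | nil => simp [pvSplit]
  | cons c rest ih => simp only [pvSplit]; split_ifs <;> simp [ih]

theorem pvGo_eq_pvSplit (fuel : Nat) (l cur : List Char) (acc : List (List Char))
    (h : l.length < fuel) :
    PySem.Chars.splitOn.go ['['] fuel l cur acc = acc.reverse ++ pvSplit cur.reverse l := by
  induction fuel generalizing l cur acc with
  | zero => omega
  | succ f ih =>
    cases l with
    | nil =>
      rw [PySem.Chars.splitOn.go]
      simp [pvSplit]
      omega
    | cons c rest =>
      rw [PySem.Chars.splitOn.go]
      by_cases hc : c = '['
      · subst hc
        have hp : List.isPrefixOf ['['] ('[' :: rest) = true := by simp [List.isPrefixOf]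
        simp only [hp]
        rw [ih _ _ _ (by simp at h ⊢; omega)]
        simp [pvSplit]
      · have hp : List.isPrefixOf ['['] (c :: rest) = false := by
          simp [List.isPrefixOf]
          exact fun h => hc h.symm
        simp only [hp, Bool.false_eq_true, if_false]
        rw [ih _ _ _ (by simp at h ⊢; omega)]
        simp [pvSplit, hc]

theorem pvSplitOn_eq (cs : List Char) :
    PySem.Chars.splitOn cs ['['] = pvSplit [] cs := by
  simpa [PySem.Chars.splitOn] using pvGo_eq_pvSplit (cs.length + 1) cs [] [] (by omega)

-- endswith '.' is "the last char is '.'"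
theorem pvEndswith_dot (v : List Char) :
    PySem.Chars.endswith v ['.'] = true ↔ v.getLast? = some '.' := by
  rw [PySem.Chars.endswith_iff]
  constructor
  · rintro ⟨t, rfl⟩; simp
  · intro h
    rcases List.getLast?_eq_some_iff.mp h with ⟨l', rfl⟩
    exact ⟨l', rfl⟩

-- A's per-piece dot rule, in normal form
def pvDot (v : List Char) : List Char :=
  if PySem.Chars.endswith v ['.'] = true then v else v ++ ['.']

theorem pvDot_spec (v : List Char) :
    pvDot v = v ++ (if v.getLast? = some '.' then [] else ['.']) := by
  unfold pvDot
  by_cases h : v.getLast? = some '.'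
  · rw [if_pos (pvEndswith_dot v |>.mpr h), if_pos h, List.append_nil]
  · rw [if_neg (fun hh => h (pvEndswith_dot v |>.mp hh)), if_neg h]

def pvTail : List (List Char) → List Char
  | [] => []
  | [q] => '[' :: q
  | q :: qs => pvDot ('[' :: q) ++ pvTail qs

theorem pvTail_cons (q : List Char) (qs : List (List Char)) (h : qs ≠ []) :
    pvTail (q :: qs) = pvDot ('[' :: q) ++ pvTail qs := by
  cases qs with
  | nil => exact absurd rfl h
  | cons a as => rfl

def pvANorm : List (List Char) → List Char
  | [] => []
  | [p] => p
  | p :: ps => pvDot p ++ pvTail ps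

theorem pvANorm_cons (p : List Char) (ps : List (List Char)) (h : ps ≠ []) :
    pvANorm (p :: ps) = pvDot p ++ pvTail ps := by
  cases ps with
  | nil => exact absurd rfl h
  | cons a as => rfl

-- the "previous character" after consuming pre, starting from prev
def pvLastO (prev : Option Char) (pre : List Char) : Option Char :=
  pre.getLast?.orElse (fun _ => prev)

theorem pvLastO_nil (prev : Option Char) : pvLastO prev [] = prev := rfl

theorem pvLastO_none (pre : List Char) : pvLastO none pre = pre.getLast? := by
  cases h : pre.getLast? <;> simp [pvLastO, h]

theorem pvLastO_cons (c : Char) (q : List Char) :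
    (c :: q).getLast? = pvLastO (some c) q := by
  cases q with
  | nil => rfl
  | cons a as =>
    rw [List.getLast?_cons_cons, pvLastO]
    cases h : (a :: as).getLast? with
    | none => simp at h
    | some x => simp

theorem pvTail_eq_scan (r q : List Char) (hq : '[' ∉ q) :
    pvTail (pvSplit q r) = '[' :: (q ++ pvBScan (pvLastO (some '[') q) r) := by
  induction r generalizing q with
  | nil => simp [pvSplit, pvTail, pvBScan]
  | cons c rest ih =>
    by_cases hc : c = '['
    · subst hc
      rw [show pvSplit q ('[' :: rest) = q :: pvSplit [] rest by simp [pvSplit],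
          pvTail_cons _ _ (pvSplit_ne_nil [] rest), ih [] (by simp),
          pvDot_spec, pvLastO_cons]
      simp only [pvLastO_nil, pvBScan]
      by_cases hd : pvLastO (some '[') q = some '.' <;>
        simp [hd]
    · rw [show pvSplit q (c :: rest) = pvSplit (q ++ [c]) rest by simp [pvSplit, hc],
          ih (q ++ [c]) (by
            intro h
            rcases List.mem_append.mp h with h' | h'
            · exact hq h'
            · exact hc (List.mem_singleton.mp h').symm)]
      have hl : pvLastO (some '[') (q ++ [c]) = some c := by simp [pvLastO]
      rw [hl]
      simp only [pvBScan, hc, false_and, if_false]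
      simp

theorem pvANorm_eq_scan (cs pre : List Char) (hpre : '[' ∉ pre) :
    pvANorm (pvSplit pre cs) = pre ++ pvBScan (pvLastO none pre) cs := by
  induction cs generalizing pre with
  | nil => simp [pvSplit, pvANorm, pvBScan]
  | cons c rest ih =>
    by_cases hc : c = '['
    · subst hc
      rw [show pvSplit pre ('[' :: rest) = pre :: pvSplit [] rest by simp [pvSplit],
          pvANorm_cons _ _ (pvSplit_ne_nil [] rest), pvTail_eq_scan rest [] (by simp),
          pvDot_spec, pvLastO_none]
      simp only [pvLastO_nil, pvBScan]
      by_cases hd : pre.getLast? = some '.' <;> simp [hd]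
    · rw [show pvSplit pre (c :: rest) = pvSplit (pre ++ [c]) rest by simp [pvSplit, hc],
          ih (pre ++ [c]) (by
            intro h
            rcases List.mem_append.mp h with h' | h'
            · exact hpre h'
            · exact hc (List.mem_singleton.mp h').symm)]
      have hl : pvLastO none (pre ++ [c]) = some c := by simp [pvLastO]
      rw [hl]
      simp only [pvBScan, hc, false_and, if_false]
      simp

theorem pvJoin_nil (ps : List (List Char)) : PySem.Chars.join [] ps = ps.flatten := by
  simp only [PySem.Chars.join]
  induction ps with
  | nil => rfl
  | cons a as ih => cases as <;> simp_all [List.intercalate, List.intersperse]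

-- the loop body over the tail pieces (indices 1..length) flattens to pvTail
theorem pvEnumTail (ps : List (List Char)) (s L : Int) (hs : 1 ≤ s)
    (hL : L = s + ps.length - 1) (hne : ps ≠ []) :
    ((PySem.List.enumerate ps s).map (fun iv =>
      if ¬ PySem.Chars.endswith (if iv.1 ≠ 0 then '[' :: iv.2 else iv.2) ['.'] = true ∧ iv.1 ≠ L
      then (if iv.1 ≠ 0 then '[' :: iv.2 else iv.2) ++ ['.']
      else (if iv.1 ≠ 0 then '[' :: iv.2 else iv.2))).flatten = pvTail ps := by
  induction ps generalizing s with
  | nil => exact absurd rfl hne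
  | cons q qs ih =>
    rw [PySem.List.enumerate_cons]
    cases qs with
    | nil =>
      have hsL : s = L := by simp at hL; omega
      simp [pvTail, hsL, PySem.List.enumerate, show ¬ (L = 0) by omega]
    | cons q' qs' =>
      have hsL : s ≠ L := by simp at hL; omega
      rw [List.map_cons, List.flatten_cons,
          ih (s + 1) (by omega) (by simp at hL ⊢; omega) (by simp),
          pvTail_cons q (q' :: qs') (by simp)]
      simp only [show ¬ (s = 0) by omega, ne_eq, not_false_eq_true, if_true]
      unfold pvDot
      by_cases he : PySem.Chars.endswith ('[' :: q) ['.'] = true <;> simp [he, hsL]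

theorem pvAChars_eq_norm (cs : List Char) :
    pvAChars cs = pvANorm (pvSplit [] cs) := by
  unfold pvAChars
  dsimp only
  rw [PySem.List.foldl_append_singleton_eq_map, List.nil_append, pvJoin_nil, pvSplitOn_eq]
  cases h : pvSplit [] cs with
  | nil => exact absurd h (pvSplit_ne_nil [] cs)
  | cons p ps =>
    rw [PySem.List.enumerate_cons, List.map_cons, List.flatten_cons]
    simp only [zero_add]
    cases ps with
    | nil => simp [pvANorm, PySem.List.enumerate]
    | cons q qs =>
      rw [pvANorm_cons _ _ (by simp),
          pvEnumTail (q :: qs) 1 ((p :: q :: qs).length - 1) (le_refl 1) (by simp) (by simp)]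
      have hL : ((p :: q :: qs).length : Int) - 1 ≠ 0 := by simp; omega
      simp only [ne_eq, not_true_eq_false, if_false]
      unfold pvDot
      by_cases he : PySem.Chars.endswith p ['.'] = true <;>
        simp [he, show ¬ ((0:Int) = (qs.length:Int) + 1) by omega]

-- ===== VERDICT (by name: the statement is the Claim_ definition above) =====
theorem convert_json_path_expr_spec : Claim_equal_convert_json_path_expr := by
  intro s _
  show _ = _
  unfold convert_json_path_expr convert_json_path_expr_alt
  rw [pvAChars_eq_norm, pvANorm_eq_scan _ _ (by simp)]
  simp [pvLastO_nil]
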